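-- pv_equiv track=rewrite | github.com/abaland/Home_Code | python/infrared_remote/convert_aircon_ir.py | merge_large_signal
-- ===== SOURCE A (Python) =====
-- threshold_too_large = 3700
--
-- def merge_large_signal(all_lengths):
--     """
--     Second pass of signal. Merge all large lengths analyzed by mode2 when they are too close to each other. Due to the
--     noise explained in phase1, a raw signal like 231000 10 10 10 10 300 10 10 10 10 329300 would be converted into
--     231000 40 300 40 329300 after phase 1. However, knowledge about how the signal SHOULD be tells us that this is
--     another type of noise and that the two holes of "40" are mistakes. This pass will merge these numbers together to
--     give 560680.
--
--     In short : merges large length together if these are close enough together.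
--
--     INPUT:
--         all_lengths (int[])  list of all length recorded by mode2 (space + pulse), with short-length merged.
--
--     OUTPUT:
--         all_length_converted (int[][]) same as input, after close large length were merged together, and after the split
--            of the full data into each individual signal
--     """
--
--     all_lengths_converted = []
--     past_large_index = None
--     for index in range(len(all_lengths)-1):
--
--         # Check if value is very large length.
--         if all_lengths[index] > threshold_too_large:
--
--             # If first very large length, just remember the position.
--             if past_large_index is None:
--
--                 past_large_index = index
--                 continue
--
--             # Otherwise, looks how many lengths are there between the two successive very large length. If small number
--             #   a signal could not have been send in between, so apply mergure.
--             if index - past_large_index < 10: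
--
--                 all_lengths[index] += sum(all_lengths[past_large_index:index])
--
--             else:
--
--                 # If large number, a signal might be between those bounds so append it to list
--                 all_lengths_converted.append(all_lengths[past_large_index:index])
--
--             past_large_index = index
--
--     all_lengths_converted.append(all_lengths[past_large_index:])
--
--     #############################
--     return all_lengths_converted
-- ===== SOURCE B (Python) =====
-- threshold_too_large = 3700
--
--
-- def merge_large_signal(all_lengths):
--     # Streaming element-wise pass: build each output segment incrementally in a
--     # buffer instead of remembering indices and cutting slices; a merged run is
--     # collapsed into its sum on the spot.  No mutation of the input (A mutates
--     # it in place; equivalence is about the return value).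
--     n = len(all_lengths)
--     result = []
--     seg = None       # buffer for the segment currently being built
--     past = 0         # index of the last large length seen (valid when seg is not None)
--     for i, x in enumerate(all_lengths):
--         if i < n - 1 and x > threshold_too_large:
--             if seg is None:
--                 seg = [x]
--             elif i - past < 10:
--                 seg = [sum(seg) + x]
--             else:
--                 result.append(seg)
--                 seg = [x]
--             past = i
--         elif seg is not None:
--             seg.append(x)
--     result.append(seg if seg is not None else list(all_lengths))
--     return result
-- ===== Notes on version B (the rewrite author's own statement) =====
-- stated objective: alternative
-- what changed: replaces A's index-remembering pass that mutates the input in place and emits slices all_lengths[past:idx] by a streaming element-wise fold that builds each output segment incrementally in a buffer and collapses a merged run into its running sum on the spot, never slicing or mutating the input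
import Mathlib
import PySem

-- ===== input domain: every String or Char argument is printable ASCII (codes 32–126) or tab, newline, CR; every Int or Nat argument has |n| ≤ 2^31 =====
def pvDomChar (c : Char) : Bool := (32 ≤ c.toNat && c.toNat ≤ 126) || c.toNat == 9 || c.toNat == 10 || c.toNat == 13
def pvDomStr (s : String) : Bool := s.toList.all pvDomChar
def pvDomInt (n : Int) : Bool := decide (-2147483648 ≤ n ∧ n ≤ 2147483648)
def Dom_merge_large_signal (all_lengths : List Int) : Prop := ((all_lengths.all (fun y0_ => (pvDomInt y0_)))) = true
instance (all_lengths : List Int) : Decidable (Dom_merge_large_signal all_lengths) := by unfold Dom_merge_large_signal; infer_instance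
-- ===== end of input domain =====

-- B replaces A's index-remembering, input-mutating, slice-emitting pass by a streaming
-- element-wise fold building each segment in a buffer (objective: alternative);
-- equivalence is about the RETURN value only — A mutates all_lengths in place, B does not.

-- ===== PORT A =====
def threshold_too_large : Int := 3700

-- loop body of A: state = (all_lengths, all_lengths_converted, past_large_index).
-- Indices are the Nats produced by range(len-1), so list access / assignment / slices use
-- getD / set / drop-take, exact for nonnegative in-range indices (index - past_large_index is
-- Nat-exact since past_large_index is always an earlier loop index).
def mlsStepA (st : List Int × List (List Int) × Option Nat) (i : Nat) :
    List Int × List (List Int) × Option Nat :=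
  let (ls, out, past) := st
  if threshold_too_large < ls.getD i 0 then
    match past with
    | none => (ls, out, some i)
    | some p =>
      if i - p < 10 then
        (ls.set i (ls.getD i 0 + ((ls.drop p).take (i - p)).sum), out, some i)
      else
        (ls, out ++ [(ls.drop p).take (i - p)], some i)
  else
    (ls, out, past)

def merge_large_signal (all_lengths : List Int) : List (List Int) :=
  let st := (List.range (all_lengths.length - 1)).foldl mlsStepA (all_lengths, [], none)
  match st.2.2 with
  | none => st.2.1 ++ [st.1]          -- all_lengths[None:] is the whole (final) list
  | some p => st.2.1 ++ [st.1.drop p] -- all_lengths[p:]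

-- ===== PORT B =====
-- loop body of B: state = (result, seg, past); one step per element of enumerate(all_lengths).
def mlsStepB (n : Int) (st : List (List Int) × Option (List Int) × Int) (ix : Int × Int) :
    List (List Int) × Option (List Int) × Int :=
  let (out, seg, past) := st
  let (i, x) := ix
  if i < n - 1 ∧ threshold_too_large < x then
    match seg with
    | none => (out, some [x], i)
    | some s =>
      if i - past < 10 then (out, some [s.sum + x], i)
      else (out ++ [s], some [x], i)
  else
    match seg with
    | some s => (out, some (s ++ [x]), past)
    | none => (out, none, past)

def merge_large_signal_alt (all_lengths : List Int) : List (List Int) :=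
  let n : Int := all_lengths.length
  let st := (PySem.List.enumerate all_lengths).foldl (mlsStepB n) ([], none, 0)
  match st.2.1 with
  | some s => st.1 ++ [s]
  | none => st.1 ++ [all_lengths]     -- no large length seen: the whole (never-mutated) list

-- ===== PRECONDITION & SPEC =====
def Spec_merge_large_signal (all_lengths : List Int) (out : List (List Int)) : Prop := out = merge_large_signal_alt all_lengths
instance (all_lengths : List Int) (out : List (List Int)) : Decidable (Spec_merge_large_signal all_lengths out) := by unfold Spec_merge_large_signal; infer_instance

-- ===== CLAIM (what is proved, stated in full; the proofs are below) =====
def Claim_equal_merge_large_signal : Prop := ∀ (all_lengths : List Int), Dom_merge_large_signal all_lengths → Spec_merge_large_signal all_lengths (merge_large_signal all_lengths)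

-- ===== LEMMAS AND PROOFS =====

-- A's state after the first k loop iterations.
def stA (orig : List Int) (k : Nat) : List Int × List (List Int) × Option Nat :=
  (List.range' 0 k).foldl mlsStepA (orig, [], none)

-- B's state after consuming the first k elements.
def stB (orig : List Int) (k : Nat) : List (List Int) × Option (List Int) × Int :=
  (PySem.List.enumerate (orig.take k)).foldl (mlsStepB orig.length) ([], none, 0)

-- the simulation invariant linking the two states after k steps
def mlsInv (orig : List Int) (k : Nat) : Prop :=
  (stB orig k).1 = (stA orig k).2.1 ∧
  (stA orig k).1.length = orig.length ∧
  (∀ j, k ≤ j → (stA orig k).1.getD j 0 = orig.getD j 0) ∧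
  ((stA orig k).2.2 = none → (stB orig k).2.1 = none ∧ (stA orig k).1 = orig) ∧
  (∀ p, (stA orig k).2.2 = some p →
     (stB orig k).2.2 = (p : Int) ∧ p < k ∧
     (stB orig k).2.1 = some (((stA orig k).1.drop p).take (k - p)))

theorem drop_take_snoc (ls : List Int) (p k : Nat) (hp : p ≤ k) (hk : k < ls.length) :
    (ls.drop p).take (k + 1 - p) = (ls.drop p).take (k - p) ++ [ls.getD k 0] := by
  have h1 : k + 1 - p = (k - p) + 1 := by omega
  rw [h1, List.take_add_one]
  have h2 : (ls.drop p)[k - p]? = some ls[k] := by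
    rw [List.getElem?_drop]
    have h3 : p + (k - p) = k := by omega
    rw [h3, List.getElem?_eq_getElem hk]
  rw [h2, List.getD_eq_getElem?_getD, List.getElem?_eq_getElem hk]
  rfl

theorem drop_take_one (ls : List Int) (k : Nat) (hk : k < ls.length) :
    (ls.drop k).take 1 = [ls.getD k 0] := by
  have h := drop_take_snoc ls k k le_rfl hk
  simpa using h

theorem stA_succ (orig : List Int) (k : Nat) :
    stA orig (k + 1) = mlsStepA (stA orig k) k := by
  unfold stA
  rw [List.range'_1_concat, List.foldl_append]
  simp

theorem stB_succ (orig : List Int) (k : Nat) (hk : k < orig.length) :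
    stB orig (k + 1) = mlsStepB orig.length (stB orig k) ((k : Int), orig.getD k 0) := by
  unfold stB
  have h1 : orig.take (k + 1) = orig.take k ++ [orig[k]] := by
    rw [List.take_add_one, List.getElem?_eq_getElem hk]; rfl
  rw [h1, PySem.List.enumerate_append, List.foldl_append]
  have hlen : (orig.take k).length = k := by simp [Nat.min_eq_left (Nat.le_of_lt hk)]
  simp [PySem.List.enumerate_cons, PySem.List.enumerate_nil, hlen,
    List.getD_eq_getElem?_getD, List.getElem?_eq_getElem hk]

theorem mls_inv_zero (orig : List Int) : mlsInv orig 0 := by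
  simp [mlsInv, stA, stB, PySem.List.enumerate_nil]

theorem mls_inv_step (orig : List Int) (k : Nat) (hk : k + 1 < orig.length)
    (h : mlsInv orig k) : mlsInv orig (k + 1) := by
  unfold mlsInv at h ⊢
  rw [stA_succ, stB_succ orig k (by omega)]
  set a := stA orig k with ha
  set b := stB orig k with hb
  obtain ⟨lsA, outA, pastA⟩ := a
  obtain ⟨outB, segB, pastB⟩ := b
  obtain ⟨hout, hlen, hagree, hnone, hsome⟩ := h
  simp only at hout hlen hagree hnone hsome
  have hvalk : lsA.getD k 0 = orig.getD k 0 := hagree k le_rfl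
  have hklt : k < lsA.length := by omega
  by_cases hbig : threshold_too_large < orig.getD k 0
  · -- large element at k: both take the large branch
    have hbigA : threshold_too_large < lsA.getD k 0 := by rw [hvalk]; exact hbig
    have hBc1 : (k : Int) < (orig.length : Int) - 1 := by omega
    cases pastA with
    | none =>
      obtain ⟨hsegB, hlsA⟩ := hnone rfl
      subst hsegB
      simp only [mlsStepA, mlsStepB, hbigA, hbig, hBc1, and_self, if_pos]
      refine ⟨hout, hlen, fun j hj => hagree j (by omega), fun hc => by simp at hc, ?_⟩
      intro p hp
      simp only [Option.some.injEq] at hp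
      subst hp
      refine ⟨rfl, by omega, ?_⟩
      rw [Nat.add_sub_cancel_left, drop_take_one lsA k hklt, hvalk]
    | some p =>
      obtain ⟨hpB, hpk, hsegB⟩ := hsome p rfl
      subst hpB hsegB
      by_cases hgap : k - p < 10
      · -- merge: A mutates index k, B collapses the buffer
        have hgapI : (k : Int) - (p : Int) < 10 := by omega
        simp only [mlsStepA, mlsStepB, hbigA, hbig, hBc1, hgap, hgapI, if_true, and_self]
        set lsA' := lsA.set k (lsA.getD k 0 + ((lsA.drop p).take (k - p)).sum) with hls'
        have hlen' : lsA'.length = lsA.length := by simp [hls']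
        have hgetk : lsA'.getD k 0 = lsA.getD k 0 + ((lsA.drop p).take (k - p)).sum := by
          rw [hls', List.getD_eq_getElem?_getD, List.getElem?_set_self',
            List.getElem?_eq_getElem hklt]
          rfl
        refine ⟨hout, by omega, ?_, fun hc => by simp at hc, ?_⟩
        · intro j hj
          rw [hls', List.getD_eq_getElem?_getD, List.getElem?_set_ne (by omega),
            ← List.getD_eq_getElem?_getD]
          exact hagree j (by omega)
        · intro q hq
          simp only [Option.some.injEq] at hq
          subst hq
          refine ⟨rfl, by omega, ?_⟩
          rw [Nat.add_sub_cancel_left, drop_take_one lsA' k (by omega), hgetk, hvalk]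
          simp [Int.add_comm]
      · -- emit the buffered segment
        have hgapI : ¬ ((k : Int) - (p : Int) < 10) := by omega
        simp only [mlsStepA, mlsStepB, hbigA, hbig, hBc1, hgap, hgapI, if_true, and_self,
          if_false]
        refine ⟨by rw [hout], hlen, fun j hj => hagree j (by omega),
          fun hc => by simp at hc, ?_⟩
        intro q hq
        simp only [Option.some.injEq] at hq
        subst hq
        refine ⟨rfl, by omega, ?_⟩
        rw [Nat.add_sub_cancel_left, drop_take_one lsA k hklt, hvalk]
  · -- not large: A skips, B appends to the buffer (if any)
    have hbigA : ¬ threshold_too_large < lsA.getD k 0 := by rw [hvalk]; exact hbig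
    have hBcond : ¬ ((k : Int) < (orig.length : Int) - 1 ∧
        threshold_too_large < orig.getD k 0) := fun hc => hbig hc.2
    simp only [mlsStepA, mlsStepB, hbigA, hBcond, if_false]
    cases pastA with
    | none =>
      obtain ⟨hsegB, hlsA⟩ := hnone rfl
      subst hsegB
      exact ⟨hout, hlen, fun j hj => hagree j (by omega),
        fun _ => ⟨rfl, hlsA⟩, fun p hp => by simp at hp⟩
    | some p =>
      obtain ⟨hpB, hpk, hsegB⟩ := hsome p rfl
      subst hpB hsegB
      refine ⟨hout, hlen, fun j hj => hagree j (by omega),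
        fun hc => by simp at hc, ?_⟩
      intro q hq
      simp only [Option.some.injEq] at hq
      subst hq
      refine ⟨rfl, by omega, ?_⟩
      rw [drop_take_snoc lsA p k (by omega) hklt, hvalk]

theorem mls_inv_all (orig : List Int) : ∀ k, k + 1 ≤ orig.length → mlsInv orig k := by
  intro k
  induction k with
  | zero => intro _; exact mls_inv_zero orig
  | succ m ih => intro h; exact mls_inv_step orig m (by omega) (ih (by omega))

-- ===== VERDICT (by name: the statement is the Claim_ definition above) =====
theorem merge_large_signal_spec : Claim_equal_merge_large_signal := by
  intro orig _
  unfold Spec_merge_large_signal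
  cases horig : orig with
  | nil => rfl
  | cons a rest =>
    have hn : 1 ≤ orig.length := by rw [horig]; simp
    rw [← horig]
    have hinv := mls_inv_all orig (orig.length - 1) (by omega)
    have hk : orig.length - 1 < orig.length := by omega
    unfold merge_large_signal merge_large_signal_alt
    have hAfold : (List.range (orig.length - 1)).foldl mlsStepA (orig, [], none) =
        stA orig (orig.length - 1) := by
      rw [stA, List.range_eq_range']
    have hBfold : (PySem.List.enumerate orig).foldl (mlsStepB orig.length) ([], none, 0) =
        stB orig orig.length := by
      rw [stB, List.take_of_length_le le_rfl]
    have hsuc : orig.length - 1 + 1 = orig.length := by omega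
    have hBstep := stB_succ orig (orig.length - 1) hk
    rw [hsuc] at hBstep
    simp only [hAfold, hBfold, hBstep]
    unfold mlsInv at hinv
    set a := stA orig (orig.length - 1) with ha
    set b := stB orig (orig.length - 1) with hb
    obtain ⟨lsA, outA, pastA⟩ := a
    obtain ⟨outB, segB, pastB⟩ := b
    obtain ⟨hout, hlen, hagree, hnone, hsome⟩ := hinv
    simp only at hout hlen hagree hnone hsome
    have hlast : ¬ (((orig.length - 1 : Nat) : Int) < (orig.length : Int) - 1 ∧
        threshold_too_large < orig.getD (orig.length - 1) 0) := by
      intro hc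
      have := hc.1
      omega
    simp only [mlsStepB]
    rw [if_neg hlast]
    cases pastA with
    | none =>
      obtain ⟨hsegB, hlsA⟩ := hnone rfl
      subst hsegB
      simp [hout, hlsA]
    | some p =>
      obtain ⟨hpB, hpk, hsegB⟩ := hsome p rfl
      subst hsegB
      have hvlast : orig.getD (orig.length - 1) 0 = lsA.getD (orig.length - 1) 0 :=
        (hagree (orig.length - 1) le_rfl).symm
      simp only
      rw [hvlast, ← drop_take_snoc lsA p (orig.length - 1) (by omega) (by omega)]
      have hfull : orig.length - 1 + 1 - p = (lsA.drop p).length := by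
        simp [hlen]; omega
      rw [hfull, List.take_length]
      simp [hout]
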